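-- pv_equiv track=rewrite | github.com/TakenakaRoberta/minharotina | app/planilhas.py | padronizar_nome_completo
-- ===== SOURCE A (Python) =====
-- def padronizar_nome_completo(nome_completo_despadronizados):
--     """
--     Padroniza um nome completo:
--     - removendo os espaços no início e no fim
--     - removendo espaços extras entre os nomes
--     - colocando em maiúsculas, inclusive nomes acentuados
--     """
--     padronizado = nome_completo_despadronizados.strip()
--     padronizado = padronizado.upper()
--     while True:
--         padronizado = padronizado.replace(" "*2, " ")
--         if "  " not in padronizado:
--             break
--     return padronizado
-- ===== SOURCE B (Python) =====
-- def padronizar_nome_completo(nome_completo_despadronizados):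
--     padronizado = nome_completo_despadronizados.strip().upper()
--     out = []
--     prev_space = False
--     for ch in padronizado:
--         if ch == ' ':
--             if not prev_space:
--                 out.append(ch)
--             prev_space = True
--         else:
--             out.append(ch)
--             prev_space = False
--     return ''.join(out)
-- ===== Notes on version B (the rewrite author's own statement) =====
-- stated objective: alternative
-- what changed: Replaces A's loop of whole-string double-space replace passes (repeated until no adjacent spaces remain) by a single left-to-right scan with a last-emitted-was-space flag that collapses each run of spaces in one pass.
import Mathlib
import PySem

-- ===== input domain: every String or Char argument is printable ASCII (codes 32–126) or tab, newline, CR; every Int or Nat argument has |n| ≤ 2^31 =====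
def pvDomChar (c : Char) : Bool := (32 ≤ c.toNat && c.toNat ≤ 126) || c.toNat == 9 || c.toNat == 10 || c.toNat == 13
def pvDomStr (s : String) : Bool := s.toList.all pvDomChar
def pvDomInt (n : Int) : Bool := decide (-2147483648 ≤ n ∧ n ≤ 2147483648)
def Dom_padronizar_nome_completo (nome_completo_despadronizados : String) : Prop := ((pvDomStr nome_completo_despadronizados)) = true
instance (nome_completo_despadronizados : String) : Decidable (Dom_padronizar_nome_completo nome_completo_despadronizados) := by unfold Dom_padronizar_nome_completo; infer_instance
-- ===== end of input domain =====

-- B collapses runs of spaces in ONE left-to-right pass (last-emitted-was-space flag) instead of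
-- A's repeated full-string `.replace("  ", " ")` passes; the return values are proved equal on all of Dom.

-- ===== PORT A =====
-- Helpers needed by the port's own termination proof: `pvDD l` = "l contains two adjacent
-- spaces", `pvRep l` = one left-to-right non-overlapping pass of `l.replace('  ', ' ')`.
def pvDD : List Char → Bool
  | [] => false
  | c :: t => (c == ' ' && t.head? == some ' ') || pvDD t

def pvRep : List Char → List Char
  | ' ' :: ' ' :: t => ' ' :: pvRep t
  | c :: t => c :: pvRep t
  | [] => []

theorem pvRep_cons_ne (c1 c2 : Char) (t : List Char) (h : ¬(c1 = ' ' ∧ c2 = ' ')) :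
    pvRep (c1 :: c2 :: t) = c1 :: pvRep (c2 :: t) := by
  rw [pvRep.eq_def]
  split
  · rename_i heq
    injection heq with h1 h2; injection h2 with h2 _
    exact absurd ⟨h1, h2⟩ h
  · rename_i heq; injection heq with h1 h2; subst h1; subst h2; rfl
  · rename_i heq; exact absurd heq (by simp)

theorem pvRep_singleton (c : Char) : pvRep [c] = [c] := by
  rw [pvRep.eq_def]
  split
  · rename_i heq; injection heq with _ h2; exact absurd h2 (by simp)
  · rename_i heq; injection heq with h1 h2; subst h1; subst h2; rfl
  · rename_i heq; exact absurd heq (by simp)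

theorem pvGo_eq (fuel : Nat) (l acc : List Char) (h : l.length ≤ fuel) :
    PySem.Chars.replace.go [' ', ' '] [' '] fuel l acc = acc.reverse ++ pvRep l := by
  induction fuel generalizing l acc with
  | zero =>
    have : l = [] := List.eq_nil_of_length_eq_zero (Nat.le_zero.mp h)
    subst this
    simp [PySem.Chars.replace.go, pvRep]
  | succ f ih =>
    match l, h with
    | [], _ => simp [PySem.Chars.replace.go, pvRep]
    | [c], h =>
      rw [PySem.Chars.replace.go]
      have hp : [' ', ' '].isPrefixOf [c] = false := by simp [List.isPrefixOf]
      simp only [hp, Bool.false_eq_true, if_false]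
      rw [ih [] (c :: acc) (by simp), pvRep_singleton]
      simp [pvRep]
    | c1 :: c2 :: t, h =>
      rw [PySem.Chars.replace.go]
      by_cases hd : c1 = ' ' ∧ c2 = ' '
      · obtain ⟨h1, h2⟩ := hd; subst h1; subst h2
        have hp : [' ', ' '].isPrefixOf (' ' :: ' ' :: t) = true := by
          simp [List.isPrefixOf]
        simp only [hp, if_true]
        rw [show List.drop [' ', ' '].length (' ' :: ' ' :: t) = t from rfl]
        rw [ih t ([' '].reverse ++ acc) (by simp at h ⊢; omega)]
        simp [pvRep]
      · have hp : [' ', ' '].isPrefixOf (c1 :: c2 :: t) = false := by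
          simp [List.isPrefixOf]
          intro h1 h2
          exact hd ⟨h1.symm, h2.symm⟩
        simp only [hp, Bool.false_eq_true, if_false]
        rw [ih (c2 :: t) (c1 :: acc) (by simp at h ⊢; omega)]
        rw [pvRep_cons_ne c1 c2 t hd]
        simp

theorem pvReplace_eq (l : List Char) :
    PySem.Chars.replace l [' ', ' '] [' '] = pvRep l := by
  rw [PySem.Chars.replace]
  simp only [List.isEmpty, Bool.false_eq_true, if_false]
  rw [pvGo_eq l.length l [] le_rfl]
  simp

theorem pvRep_len_le (l : List Char) : (pvRep l).length ≤ l.length := by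
  fun_induction pvRep l with
  | case1 t ih => simp only [List.length_cons]; omega
  | case2 c t _ ih => simp only [List.length_cons]; omega
  | case3 => simp

theorem pvRep_len_lt (l : List Char) (h : pvDD l = true) : (pvRep l).length < l.length := by
  fun_induction pvRep l with
  | case1 t _ =>
    have := pvRep_len_le t
    simp only [List.length_cons]
    omega
  | case2 c t hne ih =>
    have hdd : pvDD t = true := by
      rw [pvDD] at h
      rcases Bool.or_eq_true_iff.mp h with h' | h'
      · exfalso
        obtain ⟨h1, h2⟩ := Bool.and_eq_true_iff.mp h'
        cases t with
        | nil => simp at h2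
        | cons c2 t2 =>
          simp at h1 h2
          exact hne t2 h1 (by rw [h2])
      · exact h'
    have := ih hdd
    simp only [List.length_cons]
    omega
  | case3 => simp [pvDD] at h

theorem pvRep_of_dd_false (l : List Char) (h : pvDD l = false) : pvRep l = l := by
  fun_induction pvRep l with
  | case1 t _ => simp [pvDD] at h
  | case2 c t _ ih =>
    have hdd : pvDD t = false := by
      rw [pvDD, Bool.or_eq_false_iff] at h
      exact h.2
    rw [ih hdd]
  | case3 => rfl

theorem pvDD_infix (l : List Char) : pvDD l = true ↔ [' ', ' '] <:+: l := by
  induction l with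
  | nil => simp [pvDD]
  | cons c t ih =>
    rw [pvDD, List.infix_cons_iff, Bool.or_eq_true_iff, ih]
    constructor
    · rintro (h | h)
      · obtain ⟨h1, h2⟩ := Bool.and_eq_true_iff.mp h
        simp at h1
        cases t with
        | nil => simp at h2
        | cons c2 t2 =>
          simp at h2
          left
          rw [h1, h2]
          exact List.cons_prefix_cons.mpr ⟨rfl, List.cons_prefix_cons.mpr ⟨rfl, List.nil_prefix⟩⟩
      · exact Or.inr h
    · rintro (h | h)
      · left
        cases t with
        | nil =>
          have := h.length_le
          simp at this
        | cons c2 t2 =>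
          obtain ⟨h1, h2⟩ := List.cons_prefix_cons.mp h
          obtain ⟨h2, _⟩ := List.cons_prefix_cons.mp h2
          simp [h1.symm, h2.symm]
      · exact Or.inr h

theorem pvIsIn_eq_dd (l : List Char) : PySem.Chars.isIn [' ', ' '] l = pvDD l := by
  cases hdd : pvDD l with
  | true => exact (PySem.Chars.isIn_iff_infix _ _).mpr ((pvDD_infix l).mp hdd)
  | false =>
    rw [← Bool.not_eq_true]
    intro hin
    rw [(pvDD_infix l).mpr ((PySem.Chars.isIn_iff_infix _ _).mp hin)] at hdd
    exact Bool.true_eq_false.mp hdd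

theorem pvLoop_dec (l : List Char)
    (h : PySem.Chars.isIn [' ', ' '] (PySem.Chars.replace l [' ', ' '] [' ']) = true) :
    (PySem.Chars.replace l [' ', ' '] [' ']).length < l.length := by
  rw [pvReplace_eq] at h ⊢
  rw [pvIsIn_eq_dd] at h
  have hdd : pvDD l = true := by
    by_contra hc
    rw [pvRep_of_dd_false l (Bool.not_eq_true _ ▸ Bool.of_not_eq_true hc)] at h
    rw [h] at hc
    exact hc rfl
  exact pvRep_len_lt l hdd

-- `while True: padronizado = padronizado.replace("  ", " "); if "  " not in padronizado: break`
def pvALoop (padronizado : List Char) : List Char :=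
  let p' := PySem.Chars.replace padronizado [' ', ' '] [' ']
  if PySem.Chars.isIn [' ', ' '] p' = true then pvALoop p' else p'
termination_by padronizado.length
decreasing_by exact pvLoop_dec padronizado (by assumption)

def padronizar_nome_completo (nome_completo_despadronizados : String) : String :=
  let padronizado := PySem.Str.upper (PySem.Str.strip nome_completo_despadronizados)
  String.ofList (pvALoop padronizado.toList)

-- ===== PORT B =====
def padronizar_nome_completo_alt (nome_completo_despadronizados : String) : String :=
  let padronizado := PySem.Str.upper (PySem.Str.strip nome_completo_despadronizados)
  -- the single pass: `out` kept reversed, flag = "last emitted char was a space"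
  let st := padronizado.toList.foldl
    (fun (st : List Char × Bool) c =>
      if c = ' ' then ((if st.2 then st.1 else c :: st.1), true)
      else (c :: st.1, false)) ([], false)
  String.ofList st.1.reverse

-- ===== PRECONDITION & SPEC =====
def Spec_padronizar_nome_completo (nome_completo_despadronizados : String) (out : String) : Prop := out = padronizar_nome_completo_alt nome_completo_despadronizados
instance (nome_completo_despadronizados : String) (out : String) : Decidable (Spec_padronizar_nome_completo nome_completo_despadronizados out) := by unfold Spec_padronizar_nome_completo; infer_instance

-- ===== CLAIM (what is proved, stated in full; the proofs are below) =====
def Claim_equal_padronizar_nome_completo : Prop := ∀ (nome_completo_despadronizados : String), Dom_padronizar_nome_completo nome_completo_despadronizados → Spec_padronizar_nome_completo nome_completo_despadronizados (padronizar_nome_completo nome_completo_despadronizados)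

-- ===== LEMMAS AND PROOFS =====
-- `pvCol b l` = B's single-pass collapse, flag b = "last emitted char was a space".
def pvCol (b : Bool) : List Char → List Char
  | [] => []
  | c :: t => if c = ' ' then (if b then pvCol true t else c :: pvCol true t) else c :: pvCol false t

theorem pvFold_fst (l : List Char) (acc : List Char) (b : Bool) :
    (l.foldl (fun (st : List Char × Bool) c =>
      if c = ' ' then ((if st.2 then st.1 else c :: st.1), true)
      else (c :: st.1, false)) (acc, b)).1 = (pvCol b l).reverse ++ acc := by
  induction l generalizing acc b with
  | nil => simp [pvCol]
  | cons c t ih =>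
    simp only [List.foldl_cons]
    by_cases hc : c = ' '
    · subst hc
      cases b with
      | true => simp [pvCol, ih]
      | false => simp [pvCol, ih]
    · simp [pvCol, hc, ih]

theorem pvCol_rep (l : List Char) : ∀ b, pvCol b (pvRep l) = pvCol b l := by
  fun_induction pvRep l with
  | case1 t ih =>
    intro b
    cases b with
    | true => simp [pvCol, ih]
    | false => simp [pvCol, ih]
  | case2 c t hne ih =>
    intro b
    by_cases hc : c = ' '
    · subst hc
      cases b with
      | true => simp [pvCol, ih]
      | false => simp [pvCol, ih]
    · cases b with
      | true => simp [pvCol, hc, ih]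
      | false => simp [pvCol, hc, ih]
  | case3 => intro b; rfl

theorem pvCol_self (l : List Char) (h : pvDD l = false) :
    pvCol false l = l ∧ (l.head? ≠ some ' ' → pvCol true l = l) := by
  induction l with
  | nil => simp [pvCol]
  | cons c t ih =>
    rw [pvDD, Bool.or_eq_false_iff] at h
    obtain ⟨h1, h2⟩ := h
    obtain ⟨ihf, iht⟩ := ih h2
    by_cases hc : c = ' '
    · subst hc
      have hh : t.head? ≠ some ' ' := by
        simp at h1
        intro hcontra
        rw [hcontra] at h1
        simp at h1
      constructor
      · simp [pvCol, iht hh]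
      · intro hcontra; simp at hcontra
    · constructor
      · simp [pvCol, hc, ihf]
      · intro _; simp [pvCol, hc, ihf]

theorem pvALoop_eq (l : List Char) : pvALoop l = pvCol false l := by
  fun_induction pvALoop l with
  | case1 l p' hc ih =>
    have hp : p' = pvRep l := pvReplace_eq l
    rw [ih, hp, pvCol_rep]
  | case2 l p' hc =>
    have hp : p' = pvRep l := pvReplace_eq l
    rw [hp] at hc ⊢
    rw [pvIsIn_eq_dd] at hc
    have hdd : pvDD (pvRep l) = false := Bool.of_not_eq_true hc
    rw [← pvCol_rep l false, (pvCol_self (pvRep l) hdd).1]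

-- ===== VERDICT (by name: the statement is the Claim_ definition above) =====
theorem padronizar_nome_completo_spec : Claim_equal_padronizar_nome_completo := by
  intro s _
  unfold Spec_padronizar_nome_completo padronizar_nome_completo padronizar_nome_completo_alt
  simp only
  rw [pvALoop_eq, pvFold_fst]
  simp
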